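-- pv_equiv track=rewrite | github.com/mingen-pan/notebook | algo/Google_kickstart_2020_B/q3.py | solution
-- ===== SOURCE A (Python) =====
-- def solution(ins):
--     stack = []
--     cur = [0, 0]
--     k = 1
--     for ch in ins:
--         if ch == "N":
--             cur[1] -= 1
--         elif ch == "S":
--             cur[1] += 1
--         elif ch == "E":
--             cur[0] += 1
--         elif ch == "W":
--             cur[0] -= 1
--         elif ch == "(":
--             stack.append((cur[:], k))
--             cur = [0, 0]
--         elif ch == ")":
--             prev, k = stack.pop()
--             cur = [prev[0] + k * cur[0], prev[1] + k * cur[1]]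
--         else:
--             k = int(ch)
--
--     BASE = 1000000000
--     return (cur[0] % BASE) + 1, (cur[1] % BASE) + 1
-- ===== SOURCE B (Python) =====
-- class Unfinished(Exception):
--     """Raised when the input ends inside the group being evaluated; carries the
--     displacement that group had accumulated so far."""
--
--
-- def solution(ins):
--     it = iter(ins)
--
--     def group(k):
--         dx = dy = 0
--         for ch in it:
--             if ch == "N":
--                 dy -= 1
--             elif ch == "S":
--                 dy += 1
--             elif ch == "E":
--                 dx += 1
--             elif ch == "W":
--                 dx -= 1
--             elif ch == "(":
--                 gx, gy = group(k)
--                 dx += k * gx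
--                 dy += k * gy
--             elif ch == ")":
--                 return dx, dy
--             else:
--                 k = int(ch)
--         raise Unfinished(dx, dy)
--
--     try:
--         x, y = group(1)
--     except Unfinished as e:
--         x, y = e.args
--     BASE = 1000000000
--     return x % BASE + 1, y % BASE + 1
-- ===== Notes on version B (the rewrite author's own statement) =====
-- stated objective: alternative
-- what changed: A runs a flat stack machine over the string, pushing (cur, k) frames on '(' and popping on ')'; B is a recursive-descent evaluator over a shared character iterator, one call per parenthesised group, where end of input inside a group raises an exception carrying that group's displacement, caught at the top level.
import Mathlib
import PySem

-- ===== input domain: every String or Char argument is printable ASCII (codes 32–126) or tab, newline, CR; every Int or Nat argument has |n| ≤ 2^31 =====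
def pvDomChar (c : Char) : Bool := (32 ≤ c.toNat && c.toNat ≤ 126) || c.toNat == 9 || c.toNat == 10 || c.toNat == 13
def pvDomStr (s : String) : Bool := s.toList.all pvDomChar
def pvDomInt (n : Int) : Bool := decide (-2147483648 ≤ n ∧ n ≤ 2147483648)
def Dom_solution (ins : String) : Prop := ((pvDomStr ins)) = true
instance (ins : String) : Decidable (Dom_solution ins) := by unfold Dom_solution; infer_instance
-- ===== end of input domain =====

-- B replaces A's explicit stack machine (push (cur, k) on '(', pop on ')') by a recursive-descent
-- evaluator over a shared iterator, one call per parenthesised group, using an exception that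
-- carries a group's displacement when the input ends inside it. Alternative decomposition, same
-- cost; equality of return values is claimed on Pre_ (exactly where A returns normally).

-- ===== PORT A =====
-- state: (stack, cur, k); none = an exception was raised (int(ch) ValueError / stack.pop IndexError)
def stepA (st : Option (List ((Int × Int) × Int) × (Int × Int) × Int)) (ch : Char) :
    Option (List ((Int × Int) × Int) × (Int × Int) × Int) :=
  match st with
  | none => none
  | some (stack, (x, y), k) =>
    if ch = 'N' then some (stack, (x, y - 1), k)
    else if ch = 'S' then some (stack, (x, y + 1), k)
    else if ch = 'E' then some (stack, (x + 1, y), k)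
    else if ch = 'W' then some (stack, (x - 1, y), k)
    else if ch = '(' then some (((x, y), k) :: stack, (0, 0), k)
    else if ch = ')' then
      match stack with
      | [] => none                                   -- stack.pop: IndexError
      | ((px, py), k') :: s => some (s, (px + k' * x, py + k' * y), k')
    else if ch.isDigit then some (stack, (x, y), ((ch.toNat : Int) - 48))  -- k = int(ch)
    else none                                        -- int(ch): ValueError

def solution (ins : String) : Int × Int :=
  match ins.toList.foldl stepA (some ([], (0, 0), 1)) with
  | some (_, (x, y), _) => (PySem.Int.mod x 1000000000 + 1, PySem.Int.mod y 1000000000 + 1)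
  | none => (0, 0)                                   -- unreachable under Pre_ (Python raised)

-- ===== PORT B =====
-- Source B's group(k): the shared iterator is the char list threaded through the calls (fuel ≥ its
-- length, standing in for the termination of the recursion); dx, dy are the loop accumulators.
-- some (Sum.inl (dx, dy, rest)) = the group returned at a ')' with rest unread;
-- some (Sum.inr (dx, dy))       = raise Unfinished(dx, dy): the input ended inside this group
--                                 (it propagates through the '(' frames, as in Source B);
-- none                          = int(ch) raised ValueError.
def groupB : Nat → List Char → Int → Int → Int →
    Option ((Int × Int × List Char) ⊕ (Int × Int))
  | _, [], _, dx, dy => some (Sum.inr (dx, dy))      -- raise Unfinished(dx, dy)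
  | 0, _ :: _, _, _, _ => none                       -- fuel exhaustion: never with fuel ≥ length
  | f + 1, ch :: rest, k, dx, dy =>
    if ch = 'N' then groupB f rest k dx (dy - 1)
    else if ch = 'S' then groupB f rest k dx (dy + 1)
    else if ch = 'E' then groupB f rest k (dx + 1) dy
    else if ch = 'W' then groupB f rest k (dx - 1) dy
    else if ch = '(' then
      match groupB f rest k 0 0 with
      | some (Sum.inl (gx, gy, rest')) => groupB f rest' k (dx + k * gx) (dy + k * gy)
      | some (Sum.inr p) => some (Sum.inr p)         -- Unfinished propagates
      | none => none
    else if ch = ')' then some (Sum.inl (dx, dy, rest))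
    else if ch.isDigit then groupB f rest ((ch.toNat : Int) - 48) dx dy
    else none                                        -- int(ch): ValueError

-- Source B's top level: a normal return of group(1) and a caught Unfinished both yield (x, y)
def solution_alt (ins : String) : Int × Int :=
  match groupB ins.toList.length ins.toList 1 0 0 with
  | some (Sum.inl (x, y, _)) => (PySem.Int.mod x 1000000000 + 1, PySem.Int.mod y 1000000000 + 1)
  | some (Sum.inr (x, y)) => (PySem.Int.mod x 1000000000 + 1, PySem.Int.mod y 1000000000 + 1)
  | none => (0, 0)                                   -- unreachable under Pre_ (Python raised)

-- ===== PRECONDITION & SPEC =====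
-- Characters allowed by the program language (anything else makes int(ch) raise ValueError).
def okChar (c : Char) : Bool :=
  c = 'N' || c = 'S' || c = 'E' || c = 'W' || c = '(' || c = ')' || c.isDigit

-- no ')' while no group is open, scanning with an open-group counter
def nfB : List Char → Nat → Bool
  | [], _ => true
  | c :: cs, d =>
    if c = '(' then nfB cs (d + 1)
    else if c = ')' then decide (0 < d) && nfB cs (d - 1)
    else nfB cs d

-- Pre_ is exactly where Python A returns normally: every character in NSEW()0-9 (else int(ch)
-- raises ValueError) and no ')' without an open '(' (else stack.pop raises IndexError).
def Pre_solution (ins : String) : Prop :=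
  ins.toList.all okChar = true ∧ nfB ins.toList 0 = true
instance (ins : String) : Decidable (Pre_solution ins) := by unfold Pre_solution; infer_instance

def pvWitness_solution : String := "2(NE)3(S)W"

def Spec_solution (ins : String) (out : Int × Int) : Prop := out = solution_alt ins
instance (ins : String) (out : Int × Int) : Decidable (Spec_solution ins out) := by unfold Spec_solution; infer_instance

-- ===== CLAIM (what is proved, stated in full; the proofs are below) =====
def Claim_equal_solution : Prop :=
  ∀ (ins : String), Dom_solution ins → Pre_solution ins → Spec_solution ins (solution ins)

-- ===== LEMMAS AND PROOFS =====

theorem foldl_stepA_none (cs : List Char) : cs.foldl stepA none = none := by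
  induction cs with
  | nil => rfl
  | cons c cs ih => simpa [stepA] using ih

-- A's fold, started in any state, is determined by groupB's outcome on the same characters.
theorem groupB_foldA (f : Nat) :
    ∀ (cs : List Char) (k dx dy : Int)
      (stack : List ((Int × Int) × Int)) (res : (Int × Int × List Char) ⊕ (Int × Int)),
      groupB f cs k dx dy = some res →
      (match res with
        | Sum.inr (rx, ry) =>
          ∃ stack' kf, cs.foldl stepA (some (stack, (dx, dy), k)) = some (stack', (rx, ry), kf)
        | Sum.inl (rx, ry, rest) =>
          cs.foldl stepA (some (stack, (dx, dy), k)) =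
            match stack with
            | [] => none
            | ((px, py), k') :: s =>
              rest.foldl stepA (some (s, (px + k' * rx, py + k' * ry), k'))) := by
  induction f with
  | zero =>
    intro cs k dx dy stack res h
    cases cs with
    | nil =>
      simp only [groupB, Option.some.injEq] at h
      subst h; exact ⟨stack, k, rfl⟩
    | cons c cs => simp [groupB] at h
  | succ f ih =>
    intro cs k dx dy stack res h
    cases cs with
    | nil =>
      simp only [groupB, Option.some.injEq] at h
      subst h; exact ⟨stack, k, rfl⟩
    | cons ch rest =>
      by_cases hN : ch = 'N'
      · simp only [groupB, if_pos hN] at h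
        have heq : (ch :: rest).foldl stepA (some (stack, (dx, dy), k)) =
            rest.foldl stepA (some (stack, (dx, dy - 1), k)) := by
          simp [List.foldl, stepA, if_pos hN]
        rw [heq]; exact ih rest k dx (dy - 1) stack res h
      · by_cases hS : ch = 'S'
        · simp only [groupB, if_neg hN, if_pos hS] at h
          have heq : (ch :: rest).foldl stepA (some (stack, (dx, dy), k)) =
              rest.foldl stepA (some (stack, (dx, dy + 1), k)) := by
            simp [List.foldl, stepA, if_neg hN, if_pos hS]
          rw [heq]; exact ih rest k dx (dy + 1) stack res h
        · by_cases hE : ch = 'E'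
          · simp only [groupB, if_neg hN, if_neg hS, if_pos hE] at h
            have heq : (ch :: rest).foldl stepA (some (stack, (dx, dy), k)) =
                rest.foldl stepA (some (stack, (dx + 1, dy), k)) := by
              simp [List.foldl, stepA, if_neg hN, if_neg hS, if_pos hE]
            rw [heq]; exact ih rest k (dx + 1) dy stack res h
          · by_cases hW : ch = 'W'
            · simp only [groupB, if_neg hN, if_neg hS, if_neg hE, if_pos hW] at h
              have heq : (ch :: rest).foldl stepA (some (stack, (dx, dy), k)) =
                  rest.foldl stepA (some (stack, (dx - 1, dy), k)) := by
                simp [List.foldl, stepA, if_neg hN, if_neg hS, if_neg hE, if_pos hW]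
              rw [heq]; exact ih rest k (dx - 1) dy stack res h
            · by_cases hO : ch = '('
              · simp only [groupB, if_neg hN, if_neg hS, if_neg hE, if_neg hW, if_pos hO] at h
                have hpush : (ch :: rest).foldl stepA (some (stack, (dx, dy), k)) =
                    rest.foldl stepA (some (((dx, dy), k) :: stack, (0, 0), k)) := by
                  simp [List.foldl, stepA, if_neg hN, if_neg hS, if_neg hE, if_neg hW, if_pos hO]
                cases hin : groupB f rest k 0 0 with
                | none => rw [hin] at h; simp at h
                | some ri =>
                  cases ri with
                  | inl t =>
                    obtain ⟨gx, gy, rest'⟩ := t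
                    rw [hin] at h; simp only at h
                    have h1 := ih rest k 0 0 (((dx, dy), k) :: stack) _ hin
                    simp only at h1
                    have heq : (ch :: rest).foldl stepA (some (stack, (dx, dy), k)) =
                        rest'.foldl stepA (some (stack, (dx + k * gx, dy + k * gy), k)) := by
                      rw [hpush]; exact h1
                    rw [heq]
                    exact ih rest' k (dx + k * gx) (dy + k * gy) stack res h
                  | inr p =>
                    obtain ⟨gx, gy⟩ := p
                    rw [hin] at h
                    simp only [Option.some.injEq] at h
                    subst h
                    have h1 := ih rest k 0 0 (((dx, dy), k) :: stack) _ hin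
                    simp only at h1
                    obtain ⟨stack', kf, hkf⟩ := h1
                    exact ⟨stack', kf, by rw [hpush]; exact hkf⟩
              · by_cases hC : ch = ')'
                · simp only [groupB, if_neg hN, if_neg hS, if_neg hE, if_neg hW, if_neg hO,
                    if_pos hC, Option.some.injEq] at h
                  subst h
                  simp only
                  cases stack with
                  | nil =>
                    simp [List.foldl, stepA, if_neg hN, if_neg hS, if_neg hE, if_neg hW,
                      if_neg hO, if_pos hC, foldl_stepA_none]
                  | cons p s =>
                    obtain ⟨⟨px, py⟩, k'⟩ := p
                    simp [List.foldl, stepA, if_neg hN, if_neg hS, if_neg hE, if_neg hW,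
                      if_neg hO, if_pos hC]
                · by_cases hD : ch.isDigit
                  · simp only [groupB, if_neg hN, if_neg hS, if_neg hE, if_neg hW, if_neg hO,
                      if_neg hC, if_pos hD] at h
                    have heq : (ch :: rest).foldl stepA (some (stack, (dx, dy), k)) =
                        rest.foldl stepA (some (stack, (dx, dy), ((ch.toNat : Int) - 48))) := by
                      simp [List.foldl, stepA, if_neg hN, if_neg hS, if_neg hE, if_neg hW,
                        if_neg hO, if_neg hC, if_pos hD]
                    rw [heq]
                    exact ih rest ((ch.toNat : Int) - 48) dx dy stack res h
                  · simp [groupB, if_neg hN, if_neg hS, if_neg hE, if_neg hW, if_neg hO,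
                      if_neg hC, if_neg hD] at h

-- On an all-valid string with no ')' underflow (counter d open groups), groupB succeeds; if it
-- stops at a ')', the group count was positive and the remainder keeps the invariants.
theorem groupB_of_nf (f : Nat) :
    ∀ (cs : List Char), cs.length ≤ f → cs.all okChar = true →
      ∀ (d : Nat) (k dx dy : Int),
        nfB cs d = true →
        ∃ res, groupB f cs k dx dy = some res ∧
          ((∃ p, res = Sum.inr p) ∨
            ∃ gx gy rest, res = Sum.inl (gx, gy, rest) ∧ 0 < d ∧ rest.length < cs.length ∧
              rest.all okChar = true ∧ nfB rest (d - 1) = true) := by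
  induction f with
  | zero =>
    intro cs hf _ d k dx dy _
    have hnil : cs = [] := List.eq_nil_of_length_eq_zero (Nat.le_zero.mp hf)
    subst hnil
    exact ⟨Sum.inr (dx, dy), by simp [groupB], Or.inl ⟨(dx, dy), rfl⟩⟩
  | succ f ih =>
    intro cs hf hok d k dx dy hb
    cases cs with
    | nil => exact ⟨Sum.inr (dx, dy), by simp [groupB], Or.inl ⟨(dx, dy), rfl⟩⟩
    | cons ch rest =>
      rw [List.all_cons, Bool.and_eq_true] at hok
      have hokr : rest.all okChar = true := hok.2
      have hfr : rest.length ≤ f := by simpa using hf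
      by_cases hN : ch = 'N'
      · have hb' : nfB rest d = true := by simpa [nfB, hN] using hb
        obtain ⟨res, hr, hside⟩ := ih rest hfr hokr d k dx (dy - 1) hb'
        refine ⟨res, by simp [groupB, if_pos hN, hr], ?_⟩
        rcases hside with h | ⟨gx, gy, rs, h1, h2, h3, h4, h5⟩
        · exact Or.inl h
        · exact Or.inr ⟨gx, gy, rs, h1, h2, by simpa using Nat.lt_succ_of_lt h3, h4, h5⟩
      · by_cases hS : ch = 'S'
        · have hb' : nfB rest d = true := by simpa [nfB, hN, hS] using hb
          obtain ⟨res, hr, hside⟩ := ih rest hfr hokr d k dx (dy + 1) hb'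
          refine ⟨res, by simp [groupB, if_neg hN, if_pos hS, hr], ?_⟩
          rcases hside with h | ⟨gx, gy, rs, h1, h2, h3, h4, h5⟩
          · exact Or.inl h
          · exact Or.inr ⟨gx, gy, rs, h1, h2, by simpa using Nat.lt_succ_of_lt h3, h4, h5⟩
        · by_cases hE : ch = 'E'
          · have hb' : nfB rest d = true := by simpa [nfB, hN, hS, hE] using hb
            obtain ⟨res, hr, hside⟩ := ih rest hfr hokr d k (dx + 1) dy hb'
            refine ⟨res, by simp [groupB, if_neg hN, if_neg hS, if_pos hE, hr], ?_⟩
            rcases hside with h | ⟨gx, gy, rs, h1, h2, h3, h4, h5⟩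
            · exact Or.inl h
            · exact Or.inr ⟨gx, gy, rs, h1, h2, by simpa using Nat.lt_succ_of_lt h3, h4, h5⟩
          · by_cases hW : ch = 'W'
            · have hb' : nfB rest d = true := by simpa [nfB, hN, hS, hE, hW] using hb
              obtain ⟨res, hr, hside⟩ := ih rest hfr hokr d k (dx - 1) dy hb'
              refine ⟨res, by simp [groupB, if_neg hN, if_neg hS, if_neg hE, if_pos hW, hr], ?_⟩
              rcases hside with h | ⟨gx, gy, rs, h1, h2, h3, h4, h5⟩
              · exact Or.inl h
              · exact Or.inr ⟨gx, gy, rs, h1, h2, by simpa using Nat.lt_succ_of_lt h3, h4, h5⟩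
            · by_cases hO : ch = '('
              · have hb' : nfB rest (d + 1) = true := by simpa [nfB, hN, hS, hE, hW, hO] using hb
                obtain ⟨res₁, hr1, hside1⟩ := ih rest hfr hokr (d + 1) k 0 0 hb'
                rcases hside1 with ⟨p, rfl⟩ | ⟨gx, gy, rs, rfl, _, h3, h4, h5⟩
                · exact ⟨Sum.inr p,
                    by simp [groupB, if_neg hN, if_neg hS, if_neg hE, if_neg hW, if_pos hO, hr1],
                    Or.inl ⟨p, rfl⟩⟩
                · simp only [Nat.add_sub_cancel] at h5
                  have hfs : rs.length ≤ f := Nat.le_of_lt (Nat.lt_of_lt_of_le h3 hfr)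
                  obtain ⟨res, hr2, hside2⟩ := ih rs hfs h4 d k (dx + k * gx) (dy + k * gy) h5
                  refine ⟨res,
                    by simp [groupB, if_neg hN, if_neg hS, if_neg hE, if_neg hW, if_pos hO,
                      hr1, hr2], ?_⟩
                  rcases hside2 with h | ⟨gx2, gy2, rs2, g1, g2, g3, g4, g5⟩
                  · exact Or.inl h
                  · refine Or.inr ⟨gx2, gy2, rs2, g1, g2, ?_, g4, g5⟩
                    calc rs2.length < rs.length := g3
                      _ < rest.length := h3
                      _ < (ch :: rest).length := by simp
              · by_cases hC : ch = ')'
                · have hb' : decide (0 < d) && nfB rest (d - 1) = true := by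
                    simpa [nfB, hN, hS, hE, hW, hO, hC] using hb
                  rw [Bool.and_eq_true, decide_eq_true_eq] at hb'
                  exact ⟨Sum.inl (dx, dy, rest),
                    by simp [groupB, if_neg hN, if_neg hS, if_neg hE, if_neg hW, if_neg hO,
                      if_pos hC],
                    Or.inr ⟨dx, dy, rest, rfl, hb'.1, by simp, hokr, by simpa using hb'.2⟩⟩
                · by_cases hD : ch.isDigit
                  · have hb' : nfB rest d = true := by
                      simpa [nfB, hN, hS, hE, hW, hO, hC] using hb
                    obtain ⟨res, hr, hside⟩ := ih rest hfr hokr d ((ch.toNat : Int) - 48) dx dy hb'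
                    refine ⟨res, by simp [groupB, if_neg hN, if_neg hS, if_neg hE, if_neg hW,
                      if_neg hO, if_neg hC, if_pos hD, hr], ?_⟩
                    rcases hside with h | ⟨gx, gy, rs, h1, h2, h3, h4, h5⟩
                    · exact Or.inl h
                    · exact Or.inr ⟨gx, gy, rs, h1, h2, by simpa using Nat.lt_succ_of_lt h3, h4, h5⟩
                  · exfalso
                    have h1 := hok.1
                    simp [okChar, hN, hS, hE, hW, hO, hC, hD] at h1

-- ===== VERDICT (by name: the statement is the Claim_ definition above) =====
theorem solution_spec : Claim_equal_solution := by
  intro ins _ hpre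
  obtain ⟨hok, hnf⟩ := hpre
  obtain ⟨res, hr, hside⟩ :=
    groupB_of_nf ins.toList.length ins.toList (le_refl _) hok 0 1 0 0 hnf
  rcases hside with ⟨⟨rx, ry⟩, rfl⟩ | ⟨gx, gy, rs, _, h0, _⟩
  · have hfold := groupB_foldA ins.toList.length ins.toList 1 0 0 [] _ hr
    simp only at hfold
    obtain ⟨stack', kf, hkf⟩ := hfold
    unfold Spec_solution solution solution_alt
    rw [hkf, hr]
  · omega
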